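-- pv_equiv track=rewrite | github.com/Michael-Steshenko/IBM_interview_questions | ibm_interview_questions.py | find_next_bit
-- ===== SOURCE A (Python) =====
-- def find_next_bit(n, d):
--     cur_sum, next_sum = d, d
--     cur_mult, next_mult = 1, 1
--     while next_sum <= n:
--         cur_sum = next_sum
--         next_sum = next_sum << 1  # in production code we would check for overflow when shifting left
--
--         cur_mult = next_mult
--         next_mult = next_mult << 1
--
--     return cur_sum, cur_mult
-- ===== SOURCE B (Python) =====
-- def find_next_bit(n, d):
--     # Closed form: largest power-of-two multiple of d not exceeding n.
--     if n < d:
--         return d, 1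
--     q = n // d
--     mult = 1 << (q.bit_length() - 1)
--     return d * mult, mult
-- ===== Notes on version B (the rewrite author's own statement) =====
-- stated objective: simpler
-- what changed: Replaces the doubling loop with a closed form: mult = 1 << ((n//d).bit_length()-1), answer (d*mult, mult); constant arithmetic instead of iteration.
-- outside the precondition, e.g. on find_next_bit(5, 0): A does not finish within the time limit, B raises ZeroDivisionError; on find_next_bit(5, -2): A does not finish within the time limit, B returns (-4, 2)
import Mathlib
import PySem

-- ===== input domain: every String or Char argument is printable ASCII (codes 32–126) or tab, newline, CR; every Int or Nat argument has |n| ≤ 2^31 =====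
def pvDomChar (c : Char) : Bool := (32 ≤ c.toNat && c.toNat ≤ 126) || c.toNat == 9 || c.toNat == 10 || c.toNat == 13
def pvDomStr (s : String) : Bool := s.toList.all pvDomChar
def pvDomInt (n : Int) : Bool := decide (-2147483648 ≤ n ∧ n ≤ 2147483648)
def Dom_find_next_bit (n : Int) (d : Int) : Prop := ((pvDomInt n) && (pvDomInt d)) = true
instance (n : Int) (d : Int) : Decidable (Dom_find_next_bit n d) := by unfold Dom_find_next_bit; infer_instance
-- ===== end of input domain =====

-- B replaces A's doubling loop by a bit_length closed form (objective: simpler); on inputs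
-- where A diverges (d ≤ 0 ≤ n - d, excluded by Pre_) nothing is claimed.

-- ===== PORT A =====
-- A's while-loop; the fuel only makes the recursion total in Lean: inside Pre_ and Dom the
-- loop runs at most 33 iterations, so fuel 100 is never exhausted there.
def findLoopA (n : Int) : Nat → Int → Int → Int → Int → Int × Int
  | 0, cur_sum, _, cur_mult, _ => (cur_sum, cur_mult)
  | fuel + 1, cur_sum, next_sum, cur_mult, next_mult =>
    if next_sum ≤ n then
      findLoopA n fuel next_sum (next_sum <<< (1:Nat)) next_mult (next_mult <<< (1:Nat))
    else
      (cur_sum, cur_mult)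

def find_next_bit (n : Int) (d : Int) : Int × Int :=
  findLoopA n 100 d d 1 1

-- ===== PORT B =====
def find_next_bit_alt (n : Int) (d : Int) : Int × Int :=
  if n < d then (d, 1)
  else
    let q := PySem.Int.floordiv n d
    let mult : Int := (1 : Int) <<< (PySem.Int.bitLength q - 1)
    (d * mult, mult)

-- ===== PRECONDITION & SPEC =====
-- Pre_ excludes exactly the inputs where A never returns: the while-loop diverges when
-- d ≤ n and d ≤ 0 (next_sum never grows past n).
def Pre_find_next_bit (n : Int) (d : Int) : Prop := 0 < d ∨ n < d
instance (n : Int) (d : Int) : Decidable (Pre_find_next_bit n d) := by unfold Pre_find_next_bit; infer_instance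

def pvWitness_find_next_bit : Int × Int := (100, 3)

def Spec_find_next_bit (n : Int) (d : Int) (out : Int × Int) : Prop := out = find_next_bit_alt n d
instance (n : Int) (d : Int) (out : Int × Int) : Decidable (Spec_find_next_bit n d out) := by unfold Spec_find_next_bit; infer_instance

-- ===== CLAIM (what is proved, stated in full; the proofs are below) =====
def Claim_equal_find_next_bit : Prop := ∀ (n : Int) (d : Int), Dom_find_next_bit n d → Pre_find_next_bit n d → Spec_find_next_bit n d (find_next_bit n d)

-- ===== LEMMAS AND PROOFS =====

lemma findLoopA_succ (n cs ns cm nm : Int) (f : Nat) :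
    findLoopA n (f + 1) cs ns cm nm =
      if ns ≤ n then findLoopA n f ns (ns <<< (1:Nat)) nm (nm <<< (1:Nat)) else (cs, cm) := rfl

lemma one_shl_eq (k : Nat) : (1 : Int) <<< k = 2 ^ k := by simp [Int.shiftLeft_eq]

-- A's loop, started at stage k with the invariant state, stops at the unique m with
-- d*2^m <= n < d*2^(m+1), given enough fuel.
lemma findLoopA_spec (n d : Int) (m : Nat) (hd : 0 < d)
    (h1 : d * 2 ^ m ≤ n) (h2 : n < d * 2 ^ (m + 1)) :
    ∀ (fuel k : Nat), k ≤ m → m < k + fuel →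
      findLoopA n fuel (d * 2 ^ k) (d * 2 ^ (k + 1)) (2 ^ k) (2 ^ (k + 1)) =
        (d * 2 ^ m, 2 ^ m) := by
  intro fuel
  induction fuel with
  | zero => intro k hk hf; omega
  | succ f ih =>
    intro k hk hf
    rw [findLoopA_succ]
    by_cases hle : d * 2 ^ (k + 1) ≤ n
    · rw [if_pos hle]
      have hk1 : k + 1 ≤ m := by
        by_contra hcon
        have hpow : d * 2 ^ (k + 1) < d * 2 ^ (m + 1) := lt_of_le_of_lt hle h2
        have h2pow : (2 : Int) ^ (k + 1) < 2 ^ (m + 1) := lt_of_mul_lt_mul_left hpow hd.le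
        have := (pow_lt_pow_iff_right₀ (a := (2:Int)) (by norm_num)).mp h2pow
        omega
      have hrec := ih (k + 1) hk1 (by omega)
      have e1 : (d * 2 ^ (k + 1)) <<< (1:Nat) = d * 2 ^ (k + 1 + 1) := by
        simp [Int.shiftLeft_eq]; ring
      have e2 : ((2:Int) ^ (k + 1)) <<< (1:Nat) = 2 ^ (k + 1 + 1) := by
        simp [Int.shiftLeft_eq]; ring
      rw [e1, e2]
      exact hrec
    · rw [if_neg hle]
      have hle' : n < d * 2 ^ (k + 1) := not_le.mp hle
      have hmk : m = k := by
        have hpow : d * 2 ^ m < d * 2 ^ (k + 1) := lt_of_le_of_lt h1 hle'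
        have h2pow : (2 : Int) ^ m < 2 ^ (k + 1) := lt_of_mul_lt_mul_left hpow hd.le
        have := (pow_lt_pow_iff_right₀ (a := (2:Int)) (by norm_num)).mp h2pow
        omega
      subst hmk
      rfl

-- ===== VERDICT (by name: the statement is the Claim_ definition above) =====
theorem find_next_bit_spec : Claim_equal_find_next_bit := by
  intro n d hdom hpre
  unfold Spec_find_next_bit
  by_cases hnd : n < d
  · have ha : find_next_bit n d = (d, 1) := by
      rw [find_next_bit, show (100:Nat) = 99 + 1 from rfl, findLoopA_succ,
        if_neg (not_le.mpr hnd)]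
    have hb : find_next_bit_alt n d = (d, 1) := by
      rw [find_next_bit_alt, if_pos hnd]
    rw [ha, hb]
  · have hnd' : d ≤ n := not_lt.mp hnd
    have hd : 0 < d := by rcases hpre with h | h <;> omega
    have hq1 : 1 ≤ PySem.Int.floordiv n d := by
      rw [PySem.Int.le_floordiv_iff_mul_le hd]; omega
    have hqn : PySem.Int.floordiv n d ≠ 0 := by omega
    have hlow := PySem.Int.two_pow_bitLength_le _ hqn
    have hhigh := PySem.Int.lt_two_pow_bitLength (PySem.Int.floordiv n d)
    have hbl1 : 1 ≤ PySem.Int.bitLength (PySem.Int.floordiv n d) := by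
      by_contra h
      have h0 : PySem.Int.bitLength (PySem.Int.floordiv n d) = 0 := by omega
      rw [h0, pow_zero] at hhigh
      omega
    set m := PySem.Int.bitLength (PySem.Int.floordiv n d) - 1 with hm
    have hblm : PySem.Int.bitLength (PySem.Int.floordiv n d) = m + 1 := by omega
    rw [hblm] at hhigh
    have hlowI : (2:Int) ^ m ≤ PySem.Int.floordiv n d := by
      have hc := (Nat.cast_le (α := Int)).mpr hlow
      push_cast at hc
      rwa [abs_of_pos (show (0:Int) < PySem.Int.floordiv n d by omega)] at hc
    have hhighI : PySem.Int.floordiv n d < (2:Int) ^ (m + 1) := by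
      have hc := (Nat.cast_lt (α := Int)).mpr hhigh
      push_cast at hc
      rwa [abs_of_pos (show (0:Int) < PySem.Int.floordiv n d by omega)] at hc
    have h1 : d * 2 ^ m ≤ n := by
      have := (PySem.Int.le_floordiv_iff_mul_le hd).mp hlowI
      linarith
    have h2 : n < d * 2 ^ (m + 1) := by
      have := (PySem.Int.floordiv_lt_iff_lt_mul hd).mp hhighI
      linarith
    have hmlt : m < 99 := by
      by_contra h
      have h99 : (2:Int) ^ (99:Nat) ≤ 2 ^ m :=
        pow_le_pow_right₀ (by norm_num) (by omega)
      have hn31 : n ≤ 2147483648 := by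
        unfold Dom_find_next_bit pvDomInt at hdom
        simp at hdom
        omega
      have hdm : (2:Int) ^ m ≤ d * 2 ^ m := le_mul_of_one_le_left (by positivity) (by omega)
      norm_num at h99
      omega
    have hspec := findLoopA_spec n d m hd h1 h2 99 0 (by omega) (by omega)
    simp only [pow_zero, mul_one, zero_add, pow_one] at hspec
    have ha : find_next_bit n d = (d * 2 ^ m, 2 ^ m) := by
      rw [find_next_bit, show (100:Nat) = 99 + 1 from rfl, findLoopA_succ, if_pos hnd']
      have e1 : d <<< (1:Nat) = d * 2 := by simp [Int.shiftLeft_eq]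
      have e2 : (1:Int) <<< (1:Nat) = 2 := by decide
      rw [e1, e2]
      exact hspec
    have hb : find_next_bit_alt n d = (d * 2 ^ m, 2 ^ m) := by
      rw [find_next_bit_alt, if_neg hnd]
      show (d * ((1:Int) <<< (PySem.Int.bitLength (PySem.Int.floordiv n d) - 1)),
            (1:Int) <<< (PySem.Int.bitLength (PySem.Int.floordiv n d) - 1)) =
           (d * 2 ^ m, 2 ^ m)
      rw [← hm, one_shl_eq]
    rw [ha, hb]
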